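-- pv_equiv track=rewrite | github.com/Daus2713/simple-virus-total | source/result.py | AV_handler
-- ===== SOURCE A (Python) =====
-- def AV_handler(results, mode=None, keylist=None):
--     output_av = []
--     avlist = {}
--     for av_name, av_attributes in results.items():
--         # Replace spaces with underscores in the AV name
--         new_av_name = av_name.replace(" ", "_")
--         avlist[new_av_name] = av_attributes
--
--     if "category" in mode or "all" in mode:
--         output_av.append(1)
--     else:
--         for av_name, av_attributes in avlist.items():
--             if "antivirus" in mode:
--                 if av_name in keylist:
--                     output_av.append(av_name)
--             elif "avmethod" in mode:
--                 if av_attributes.get("method") in keylist: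
--                     output_av.append(av_name)
--             elif "avcategory" in mode:
--                 if av_attributes.get("category") in keylist:
--                     output_av.append(av_name)
--             elif "avengine" in mode:
--                 if av_attributes.get("engine_name") in keylist:
--                     output_av.append(av_name)
--             elif "avresult" in mode:
--                 if av_attributes.get("result") in keylist:
--                     output_av.append(av_name)
--
--     av_results = []
--     if output_av:
--         total_av = 0
--         for av_name, av_attributes in avlist.items():
--             if av_name in output_av or output_av[0] == 1:
--                 result = av_attributes.get("result", "Unknown Result")
--                 method = av_attributes.get("method", "Unknown Method")
--                 category = av_attributes.get("category", "Unknown Category")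
--                 engine_name = av_attributes.get("engine_name", "Unknown Engine Name")
--                 if "file" in mode:
--                     engine_version = av_attributes.get("engine_version")
--                     engine_update = av_attributes.get("engine_update")
--                     engine_name = f"{engine_name} {engine_version}v {engine_update}"
--                 av_results.append(av_name)
--                 av_results.append(f"Result: {result}, Method: {method}")
--                 av_results.append(f"Category: {category}, Engine Name: {engine_name}\n")
--                 total_av += 1
--         av_results.append(f"** Total: {total_av}")
--
--     else:
--         return "No result found"
--
--     return "\n".join(av_results)
-- ===== SOURCE B (Python) =====
-- def AV_handler(results, mode=None, keylist=None):
--     avlist = {}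
--     for av_name, av_attributes in results.items():
--         avlist[av_name.replace(" ", "_")] = av_attributes
--
--     all_flag = "category" in mode or "all" in mode
--
--     def matches(av_name, av_attributes):
--         if "antivirus" in mode:
--             return av_name in keylist
--         if "avmethod" in mode:
--             return av_attributes.get("method") in keylist
--         if "avcategory" in mode:
--             return av_attributes.get("category") in keylist
--         if "avengine" in mode:
--             return av_attributes.get("engine_name") in keylist
--         if "avresult" in mode:
--             return av_attributes.get("result") in keylist
--         return False
--
--     lines = []
--     total_av = 0
--     any_match = False
--     for av_name, av_attributes in avlist.items():
--         if all_flag or matches(av_name, av_attributes):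
--             any_match = True
--             engine_name = av_attributes.get("engine_name", "Unknown Engine Name")
--             if "file" in mode:
--                 engine_name = f"{engine_name} {av_attributes.get('engine_version')}v {av_attributes.get('engine_update')}"
--             lines.append(av_name)
--             lines.append(f"Result: {av_attributes.get('result', 'Unknown Result')}, Method: {av_attributes.get('method', 'Unknown Method')}")
--             lines.append(f"Category: {av_attributes.get('category', 'Unknown Category')}, Engine Name: {engine_name}\n")
--             total_av += 1
--     if all_flag or any_match:
--         lines.append(f"** Total: {total_av}")
--         return "\n".join(lines)
--     return "No result found"
-- ===== Notes on version B (the rewrite author's own statement) =====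
-- stated objective: simpler
-- what changed: Drops A's intermediate output_av filter table and second membership scan; one fused pass over avlist decides the match per AV (all-flag computed once), formats its lines and counts, with an any_match flag replacing the non-empty-table test.
import Mathlib
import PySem

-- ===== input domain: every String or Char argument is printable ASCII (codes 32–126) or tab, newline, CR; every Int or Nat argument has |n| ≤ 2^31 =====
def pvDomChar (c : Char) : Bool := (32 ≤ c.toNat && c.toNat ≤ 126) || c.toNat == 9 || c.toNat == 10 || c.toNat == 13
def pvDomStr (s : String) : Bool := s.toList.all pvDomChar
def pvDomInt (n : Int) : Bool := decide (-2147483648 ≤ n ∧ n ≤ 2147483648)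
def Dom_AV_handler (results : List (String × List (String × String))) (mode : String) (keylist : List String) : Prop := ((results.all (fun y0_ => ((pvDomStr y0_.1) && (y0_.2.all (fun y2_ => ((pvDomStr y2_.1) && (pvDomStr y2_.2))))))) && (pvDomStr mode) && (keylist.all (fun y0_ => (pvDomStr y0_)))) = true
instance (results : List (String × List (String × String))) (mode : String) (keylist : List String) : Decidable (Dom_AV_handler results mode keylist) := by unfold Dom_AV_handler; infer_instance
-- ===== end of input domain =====

-- B fuses A's filter table + second membership scan into one pass over avlist (objective: simpler); return value only.

-- ===== PORT A =====
-- shared tiny helper: Python f-string rendering of a possibly-missing dict value (None prints as "None")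
def pvOptStr (o : Option String) : String :=
  match o with
  | some v => v
  | none => "None"

-- output_av is Python's heterogeneous list holding either the int 1 or AV names:
-- encoded as List (Option String), none = the int 1 sentinel, some name = an AV name.
def AV_handler (results : List (String × List (String × String))) (mode : String) (keylist : List String) : String :=
  let avlist : PySem.Dict String (List (String × String)) :=
    results.foldl (fun d p => d.insert (PySem.Str.replace p.1 " " "_") p.2) PySem.Dict.empty
  let output_av : List (Option String) :=
    if PySem.Str.isIn "category" mode || PySem.Str.isIn "all" mode then
      [none]
    else
      avlist.items.foldl (fun (acc : List (Option String)) (p : String × List (String × String)) =>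
        if PySem.Str.isIn "antivirus" mode then
          if decide (p.1 ∈ keylist) then acc ++ [some p.1] else acc
        else if PySem.Str.isIn "avmethod" mode then
          if ((PySem.Dict.mk p.2).get? "method").any (fun v => decide (v ∈ keylist)) then acc ++ [some p.1] else acc
        else if PySem.Str.isIn "avcategory" mode then
          if ((PySem.Dict.mk p.2).get? "category").any (fun v => decide (v ∈ keylist)) then acc ++ [some p.1] else acc
        else if PySem.Str.isIn "avengine" mode then
          if ((PySem.Dict.mk p.2).get? "engine_name").any (fun v => decide (v ∈ keylist)) then acc ++ [some p.1] else acc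
        else if PySem.Str.isIn "avresult" mode then
          if ((PySem.Dict.mk p.2).get? "result").any (fun v => decide (v ∈ keylist)) then acc ++ [some p.1] else acc
        else acc) []
  if output_av ≠ [] then
    let st : List String × Int :=
      avlist.items.foldl (fun (st : List String × Int) p =>
        if some p.1 ∈ output_av ∨ output_av.head? = some none then
          let attrs := PySem.Dict.mk p.2
          let result := attrs.getD "result" "Unknown Result"
          let method := attrs.getD "method" "Unknown Method"
          let category := attrs.getD "category" "Unknown Category"
          let engine_name0 := attrs.getD "engine_name" "Unknown Engine Name"
          let engine_name :=
            if PySem.Str.isIn "file" mode then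
              engine_name0 ++ " " ++ pvOptStr (attrs.get? "engine_version") ++ "v " ++ pvOptStr (attrs.get? "engine_update")
            else engine_name0
          (st.1 ++ [p.1,
                    "Result: " ++ result ++ ", Method: " ++ method,
                    "Category: " ++ category ++ ", Engine Name: " ++ engine_name ++ "\n"],
           st.2 + 1)
        else st) ([], 0)
    PySem.Str.join "\n" (st.1 ++ ["** Total: " ++ PySem.Int.toStr st.2])
  else "No result found"

-- ===== PORT B =====
def AV_matches (mode : String) (keylist : List String) (av_name : String) (attrs : List (String × String)) : Bool :=
  if PySem.Str.isIn "antivirus" mode then decide (av_name ∈ keylist)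
  else if PySem.Str.isIn "avmethod" mode then ((PySem.Dict.mk attrs).get? "method").any (fun v => decide (v ∈ keylist))
  else if PySem.Str.isIn "avcategory" mode then ((PySem.Dict.mk attrs).get? "category").any (fun v => decide (v ∈ keylist))
  else if PySem.Str.isIn "avengine" mode then ((PySem.Dict.mk attrs).get? "engine_name").any (fun v => decide (v ∈ keylist))
  else if PySem.Str.isIn "avresult" mode then ((PySem.Dict.mk attrs).get? "result").any (fun v => decide (v ∈ keylist))
  else false

def AV_handler_alt (results : List (String × List (String × String))) (mode : String) (keylist : List String) : String :=
  let avlist : PySem.Dict String (List (String × String)) :=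
    results.foldl (fun d p => d.insert (PySem.Str.replace p.1 " " "_") p.2) PySem.Dict.empty
  let allFlag := PySem.Str.isIn "category" mode || PySem.Str.isIn "all" mode
  let st : List String × Int × Bool :=
    avlist.items.foldl (fun (st : List String × Int × Bool) p =>
      if allFlag || AV_matches mode keylist p.1 p.2 then
        let attrs := PySem.Dict.mk p.2
        let result := attrs.getD "result" "Unknown Result"
        let method := attrs.getD "method" "Unknown Method"
        let category := attrs.getD "category" "Unknown Category"
        let engine_name0 := attrs.getD "engine_name" "Unknown Engine Name"
        let engine_name :=
          if PySem.Str.isIn "file" mode then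
            engine_name0 ++ " " ++ pvOptStr (attrs.get? "engine_version") ++ "v " ++ pvOptStr (attrs.get? "engine_update")
          else engine_name0
        (st.1 ++ [p.1,
                  "Result: " ++ result ++ ", Method: " ++ method,
                  "Category: " ++ category ++ ", Engine Name: " ++ engine_name ++ "\n"],
         st.2.1 + 1, true)
      else st) ([], 0, false)
  if allFlag || st.2.2 then
    PySem.Str.join "\n" (st.1 ++ ["** Total: " ++ PySem.Int.toStr st.2.1])
  else "No result found"

-- ===== PRECONDITION & SPEC =====
def Spec_AV_handler (results : List (String × List (String × String))) (mode : String) (keylist : List String) (out : String) : Prop := out = AV_handler_alt results mode keylist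
instance (results : List (String × List (String × String))) (mode : String) (keylist : List String) (out : String) : Decidable (Spec_AV_handler results mode keylist out) := by unfold Spec_AV_handler; infer_instance

-- ===== CLAIM (what is proved, stated in full; the proofs are below) =====
def Claim_equal_AV_handler : Prop := ∀ (results : List (String × List (String × String))) (mode : String) (keylist : List String), Dom_AV_handler results mode keylist → Spec_AV_handler results mode keylist (AV_handler results mode keylist)

-- ===== LEMMAS AND PROOFS =====

-- The two emit folds agree when their conditions agree pointwise on the list.
theorem pv_fold_eq {α : Type} (emit : α → List String)
    (cA : α → Prop) [DecidablePred cA] (cB : α → Bool) :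
    ∀ (l : List α), (∀ p ∈ l, cA p ↔ cB p = true) →
    ∀ (acc : List String) (t : Int) (m : Bool),
      (l.foldl (fun st p => if cA p then (st.1 ++ emit p, st.2 + 1) else st) (acc, t)) =
      ((l.foldl (fun st p => if cB p then (st.1 ++ emit p, st.2.1 + 1, true) else st) (acc, t, m)).1,
       (l.foldl (fun st p => if cB p then (st.1 ++ emit p, st.2.1 + 1, true) else st) (acc, t, m)).2.1) := by
  intro l
  induction l with
  | nil => intro _ acc t m; simp
  | cons p l ih =>
    intro h acc t m
    have hp := h p (by simp)
    by_cases hc : cA p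
    · have hb : cB p = true := hp.mp hc
      simp only [List.foldl_cons, if_pos hc, hb, if_true]
      exact ih (fun q hq => h q (by simp [hq])) _ _ _
    · have hb : cB p = false := by
        cases hcb : cB p
        · rfl
        · exact absurd (hp.mpr hcb) hc
      simp only [List.foldl_cons, if_neg hc, hb, Bool.false_eq_true, if_false]
      exact ih (fun q hq => h q (by simp [hq])) _ _ _

-- The any-match flag of B's fold is the initial flag or'd with an existence test.
theorem pv_fold_flag {α : Type} (emit : α → List String) (cB : α → Bool) :
    ∀ (l : List α) (acc : List String) (t : Int) (m : Bool),
      (l.foldl (fun st p => if cB p then (st.1 ++ emit p, st.2.1 + 1, true) else st) (acc, t, m)).2.2 =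
      (m || l.any cB) := by
  intro l
  induction l with
  | nil => simp
  | cons p l ih =>
    intro acc t m
    by_cases hc : cB p = true
    · simp [hc, ih]
    · simp only [Bool.not_eq_true] at hc
      simp [hc, ih]

-- A's filter loop builds exactly the matched names (tagged some), in order.
set_option maxHeartbeats 2000000 in
theorem pv_outputav_eq (mode : String) (keylist : List String) :
    ∀ (l : List (String × List (String × String))) (acc : List (Option String)),
      (l.foldl (fun (acc : List (Option String)) (p : String × List (String × String)) =>
        if PySem.Str.isIn "antivirus" mode then
          if decide (p.1 ∈ keylist) then acc ++ [some p.1] else acc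
        else if PySem.Str.isIn "avmethod" mode then
          if ((PySem.Dict.mk p.2).get? "method").any (fun v => decide (v ∈ keylist)) then acc ++ [some p.1] else acc
        else if PySem.Str.isIn "avcategory" mode then
          if ((PySem.Dict.mk p.2).get? "category").any (fun v => decide (v ∈ keylist)) then acc ++ [some p.1] else acc
        else if PySem.Str.isIn "avengine" mode then
          if ((PySem.Dict.mk p.2).get? "engine_name").any (fun v => decide (v ∈ keylist)) then acc ++ [some p.1] else acc
        else if PySem.Str.isIn "avresult" mode then
          if ((PySem.Dict.mk p.2).get? "result").any (fun v => decide (v ∈ keylist)) then acc ++ [some p.1] else acc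
        else acc) acc) =
      acc ++ (l.filter (fun p => AV_matches mode keylist p.1 p.2)).map (fun p => (some p.1 : Option String)) := by
  intro l
  induction l with
  | nil => intro acc; simp
  | cons p l ih =>
    intro acc
    simp only [List.foldl_cons, List.filter_cons]
    by_cases hm : AV_matches mode keylist p.1 p.2 = true
    · have hstep : (if PySem.Str.isIn "antivirus" mode then
          if decide (p.1 ∈ keylist) then acc ++ [some p.1] else acc
        else if PySem.Str.isIn "avmethod" mode then
          if ((PySem.Dict.mk p.2).get? "method").any (fun v => decide (v ∈ keylist)) then acc ++ [some p.1] else acc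
        else if PySem.Str.isIn "avcategory" mode then
          if ((PySem.Dict.mk p.2).get? "category").any (fun v => decide (v ∈ keylist)) then acc ++ [some p.1] else acc
        else if PySem.Str.isIn "avengine" mode then
          if ((PySem.Dict.mk p.2).get? "engine_name").any (fun v => decide (v ∈ keylist)) then acc ++ [some p.1] else acc
        else if PySem.Str.isIn "avresult" mode then
          if ((PySem.Dict.mk p.2).get? "result").any (fun v => decide (v ∈ keylist)) then acc ++ [some p.1] else acc
        else acc) = acc ++ [some p.1] := by
        unfold AV_matches at hm
        split_ifs at hm ⊢ <;> simp_all
      rw [hstep, ih, hm]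
      simp
    · simp only [Bool.not_eq_true] at hm
      have hstep : (if PySem.Str.isIn "antivirus" mode then
          if decide (p.1 ∈ keylist) then acc ++ [some p.1] else acc
        else if PySem.Str.isIn "avmethod" mode then
          if ((PySem.Dict.mk p.2).get? "method").any (fun v => decide (v ∈ keylist)) then acc ++ [some p.1] else acc
        else if PySem.Str.isIn "avcategory" mode then
          if ((PySem.Dict.mk p.2).get? "category").any (fun v => decide (v ∈ keylist)) then acc ++ [some p.1] else acc
        else if PySem.Str.isIn "avengine" mode then
          if ((PySem.Dict.mk p.2).get? "engine_name").any (fun v => decide (v ∈ keylist)) then acc ++ [some p.1] else acc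
        else if PySem.Str.isIn "avresult" mode then
          if ((PySem.Dict.mk p.2).get? "result").any (fun v => decide (v ∈ keylist)) then acc ++ [some p.1] else acc
        else acc) = acc := by
        unfold AV_matches at hm
        split_ifs at hm ⊢ <;> simp_all
      rw [hstep, ih, hm]
      simp

-- Keys of the renamed dict are nodup.
theorem pv_avlist_nodup (results : List (String × List (String × String))) :
    (results.foldl (fun d p => d.insert (PySem.Str.replace p.1 " " "_") p.2)
      (PySem.Dict.empty : PySem.Dict String (List (String × String)))).keys.Nodup := by
  suffices h : ∀ (l : List (String × List (String × String))) (d : PySem.Dict String (List (String × String))),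
      d.keys.Nodup → (l.foldl (fun d p => d.insert (PySem.Str.replace p.1 " " "_") p.2) d).keys.Nodup by
    exact h results PySem.Dict.empty (by simp [PySem.Dict.keys_empty])
  intro l
  induction l with
  | nil => intro d hd; simpa using hd
  | cons p l ih => intro d hd; exact ih _ (PySem.Dict.nodup_keys_insert _ _ _ hd)

-- Core equality, over an arbitrary items list with nodup keys.
set_option maxHeartbeats 1000000 in
theorem pv_main (mode : String) (keylist : List String)
    (items : List (String × List (String × String)))
    (hnodup : (items.map (fun p => p.1)).Nodup) :
    (let output_av : List (Option String) :=
      if PySem.Str.isIn "category" mode || PySem.Str.isIn "all" mode then [none]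
      else items.foldl (fun (acc : List (Option String)) (p : String × List (String × String)) =>
        if PySem.Str.isIn "antivirus" mode then
          if decide (p.1 ∈ keylist) then acc ++ [some p.1] else acc
        else if PySem.Str.isIn "avmethod" mode then
          if ((PySem.Dict.mk p.2).get? "method").any (fun v => decide (v ∈ keylist)) then acc ++ [some p.1] else acc
        else if PySem.Str.isIn "avcategory" mode then
          if ((PySem.Dict.mk p.2).get? "category").any (fun v => decide (v ∈ keylist)) then acc ++ [some p.1] else acc
        else if PySem.Str.isIn "avengine" mode then
          if ((PySem.Dict.mk p.2).get? "engine_name").any (fun v => decide (v ∈ keylist)) then acc ++ [some p.1] else acc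
        else if PySem.Str.isIn "avresult" mode then
          if ((PySem.Dict.mk p.2).get? "result").any (fun v => decide (v ∈ keylist)) then acc ++ [some p.1] else acc
        else acc) [];
    if output_av ≠ [] then
      PySem.Str.join "\n"
        ((items.foldl (fun (st : List String × Int) p =>
            if some p.1 ∈ output_av ∨ output_av.head? = some none then
              (st.1 ++ (fun p : String × List (String × String) =>
        [p.1,
         "Result: " ++ (PySem.Dict.mk p.2).getD "result" "Unknown Result" ++ ", Method: " ++ (PySem.Dict.mk p.2).getD "method" "Unknown Method",
         "Category: " ++ (PySem.Dict.mk p.2).getD "category" "Unknown Category" ++ ", Engine Name: " ++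
           (if PySem.Str.isIn "file" mode then
              (PySem.Dict.mk p.2).getD "engine_name" "Unknown Engine Name" ++ " " ++ pvOptStr ((PySem.Dict.mk p.2).get? "engine_version") ++ "v " ++ pvOptStr ((PySem.Dict.mk p.2).get? "engine_update")
            else (PySem.Dict.mk p.2).getD "engine_name" "Unknown Engine Name") ++ "\n"]) p, st.2 + 1)
            else st) ([], 0)).1 ++
         ["** Total: " ++ PySem.Int.toStr (items.foldl (fun (st : List String × Int) p =>
            if some p.1 ∈ output_av ∨ output_av.head? = some none then
              (st.1 ++ (fun p : String × List (String × String) =>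
        [p.1,
         "Result: " ++ (PySem.Dict.mk p.2).getD "result" "Unknown Result" ++ ", Method: " ++ (PySem.Dict.mk p.2).getD "method" "Unknown Method",
         "Category: " ++ (PySem.Dict.mk p.2).getD "category" "Unknown Category" ++ ", Engine Name: " ++
           (if PySem.Str.isIn "file" mode then
              (PySem.Dict.mk p.2).getD "engine_name" "Unknown Engine Name" ++ " " ++ pvOptStr ((PySem.Dict.mk p.2).get? "engine_version") ++ "v " ++ pvOptStr ((PySem.Dict.mk p.2).get? "engine_update")
            else (PySem.Dict.mk p.2).getD "engine_name" "Unknown Engine Name") ++ "\n"]) p, st.2 + 1)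
            else st) ([], 0)).2])
    else "No result found")
    =
    (if (PySem.Str.isIn "category" mode || PySem.Str.isIn "all" mode) ||
        (items.foldl (fun (st : List String × Int × Bool) p =>
          if (PySem.Str.isIn "category" mode || PySem.Str.isIn "all" mode) || AV_matches mode keylist p.1 p.2 then
            (st.1 ++ (fun p : String × List (String × String) =>
        [p.1,
         "Result: " ++ (PySem.Dict.mk p.2).getD "result" "Unknown Result" ++ ", Method: " ++ (PySem.Dict.mk p.2).getD "method" "Unknown Method",
         "Category: " ++ (PySem.Dict.mk p.2).getD "category" "Unknown Category" ++ ", Engine Name: " ++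
           (if PySem.Str.isIn "file" mode then
              (PySem.Dict.mk p.2).getD "engine_name" "Unknown Engine Name" ++ " " ++ pvOptStr ((PySem.Dict.mk p.2).get? "engine_version") ++ "v " ++ pvOptStr ((PySem.Dict.mk p.2).get? "engine_update")
            else (PySem.Dict.mk p.2).getD "engine_name" "Unknown Engine Name") ++ "\n"]) p, st.2.1 + 1, true)
          else st) ([], 0, false)).2.2 then
      PySem.Str.join "\n"
        ((items.foldl (fun (st : List String × Int × Bool) p =>
            if (PySem.Str.isIn "category" mode || PySem.Str.isIn "all" mode) || AV_matches mode keylist p.1 p.2 then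
              (st.1 ++ (fun p : String × List (String × String) =>
        [p.1,
         "Result: " ++ (PySem.Dict.mk p.2).getD "result" "Unknown Result" ++ ", Method: " ++ (PySem.Dict.mk p.2).getD "method" "Unknown Method",
         "Category: " ++ (PySem.Dict.mk p.2).getD "category" "Unknown Category" ++ ", Engine Name: " ++
           (if PySem.Str.isIn "file" mode then
              (PySem.Dict.mk p.2).getD "engine_name" "Unknown Engine Name" ++ " " ++ pvOptStr ((PySem.Dict.mk p.2).get? "engine_version") ++ "v " ++ pvOptStr ((PySem.Dict.mk p.2).get? "engine_update")
            else (PySem.Dict.mk p.2).getD "engine_name" "Unknown Engine Name") ++ "\n"]) p, st.2.1 + 1, true)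
            else st) ([], 0, false)).1 ++
         ["** Total: " ++ PySem.Int.toStr (items.foldl (fun (st : List String × Int × Bool) p =>
            if (PySem.Str.isIn "category" mode || PySem.Str.isIn "all" mode) || AV_matches mode keylist p.1 p.2 then
              (st.1 ++ (fun p : String × List (String × String) =>
        [p.1,
         "Result: " ++ (PySem.Dict.mk p.2).getD "result" "Unknown Result" ++ ", Method: " ++ (PySem.Dict.mk p.2).getD "method" "Unknown Method",
         "Category: " ++ (PySem.Dict.mk p.2).getD "category" "Unknown Category" ++ ", Engine Name: " ++
           (if PySem.Str.isIn "file" mode then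
              (PySem.Dict.mk p.2).getD "engine_name" "Unknown Engine Name" ++ " " ++ pvOptStr ((PySem.Dict.mk p.2).get? "engine_version") ++ "v " ++ pvOptStr ((PySem.Dict.mk p.2).get? "engine_update")
            else (PySem.Dict.mk p.2).getD "engine_name" "Unknown Engine Name") ++ "\n"]) p, st.2.1 + 1, true)
            else st) ([], 0, false)).2.1])
    else "No result found") := by
  cases hall : (PySem.Str.isIn "category" mode || PySem.Str.isIn "all" mode) with
  | true =>
    simp only [Bool.true_or, reduceIte]
    exact congrArg (fun q : List String × Int => PySem.Str.join "\n" (q.1 ++ ["** Total: " ++ PySem.Int.toStr q.2]))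
      (pv_fold_eq (fun p : String × List (String × String) =>
        [p.1,
         "Result: " ++ (PySem.Dict.mk p.2).getD "result" "Unknown Result" ++ ", Method: " ++ (PySem.Dict.mk p.2).getD "method" "Unknown Method",
         "Category: " ++ (PySem.Dict.mk p.2).getD "category" "Unknown Category" ++ ", Engine Name: " ++
           (if PySem.Str.isIn "file" mode then
              (PySem.Dict.mk p.2).getD "engine_name" "Unknown Engine Name" ++ " " ++ pvOptStr ((PySem.Dict.mk p.2).get? "engine_version") ++ "v " ++ pvOptStr ((PySem.Dict.mk p.2).get? "engine_update")
            else (PySem.Dict.mk p.2).getD "engine_name" "Unknown Engine Name") ++ "\n"])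
        (fun p : String × List (String × String) => some p.1 ∈ ([none] : List (Option String)) ∨ ([none] : List (Option String)).head? = some none)
        (fun _ => true) items (by intro p _; simp) [] 0 false)
  | false =>
    simp only [Bool.false_eq_true, if_false, Bool.false_or]
    rw [pv_outputav_eq mode keylist items []]
    simp only [List.nil_append]
    set OUT := (items.filter (fun p => AV_matches mode keylist p.1 p.2)).map (fun p => (some p.1 : Option String)) with hOUT
    have hflag : (items.foldl (fun (st : List String × Int × Bool) p =>
        if AV_matches mode keylist p.1 p.2 then
          (st.1 ++ (fun p : String × List (String × String) =>
        [p.1,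
         "Result: " ++ (PySem.Dict.mk p.2).getD "result" "Unknown Result" ++ ", Method: " ++ (PySem.Dict.mk p.2).getD "method" "Unknown Method",
         "Category: " ++ (PySem.Dict.mk p.2).getD "category" "Unknown Category" ++ ", Engine Name: " ++
           (if PySem.Str.isIn "file" mode then
              (PySem.Dict.mk p.2).getD "engine_name" "Unknown Engine Name" ++ " " ++ pvOptStr ((PySem.Dict.mk p.2).get? "engine_version") ++ "v " ++ pvOptStr ((PySem.Dict.mk p.2).get? "engine_update")
            else (PySem.Dict.mk p.2).getD "engine_name" "Unknown Engine Name") ++ "\n"]) p, st.2.1 + 1, true)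
        else st) ([], 0, false)).2.2 = (false || items.any (fun p => AV_matches mode keylist p.1 p.2)) :=
      pv_fold_flag (fun p : String × List (String × String) =>
        [p.1,
         "Result: " ++ (PySem.Dict.mk p.2).getD "result" "Unknown Result" ++ ", Method: " ++ (PySem.Dict.mk p.2).getD "method" "Unknown Method",
         "Category: " ++ (PySem.Dict.mk p.2).getD "category" "Unknown Category" ++ ", Engine Name: " ++
           (if PySem.Str.isIn "file" mode then
              (PySem.Dict.mk p.2).getD "engine_name" "Unknown Engine Name" ++ " " ++ pvOptStr ((PySem.Dict.mk p.2).get? "engine_version") ++ "v " ++ pvOptStr ((PySem.Dict.mk p.2).get? "engine_update")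
            else (PySem.Dict.mk p.2).getD "engine_name" "Unknown Engine Name") ++ "\n"]) (fun p => AV_matches mode keylist p.1 p.2) items [] 0 false
    by_cases hne : OUT = []
    · have hany : items.any (fun p => AV_matches mode keylist p.1 p.2) = false := by
        rw [hOUT] at hne
        simp only [List.map_eq_nil_iff, List.filter_eq_nil_iff] at hne
        simp only [List.any_eq_false]
        exact hne
      rw [if_neg (by simp [hne]), hflag, hany]
      simp
    · have hany : items.any (fun p => AV_matches mode keylist p.1 p.2) = true := by
        rw [hOUT] at hne
        simp only [List.map_eq_nil_iff] at hne
        rcases List.exists_mem_of_ne_nil _ hne with ⟨q, hq⟩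
        have := List.mem_filter.mp hq
        exact List.any_eq_true.mpr ⟨q, this.1, this.2⟩
      rw [if_pos hne, hflag, hany]
      simp only [Bool.false_or, reduceIte]
      have hinj : ∀ p ∈ items, ∀ q ∈ items, p.1 = q.1 → p = q := by
        intro p hp q hq hpq
        exact List.inj_on_of_nodup_map hnodup hp hq hpq
      have hcond : ∀ p ∈ items,
          ((some p.1 ∈ OUT ∨ OUT.head? = some none) ↔ AV_matches mode keylist p.1 p.2 = true) := by
        intro p hp
        constructor
        · rintro (hmem | hhd)
          · rw [hOUT] at hmem
            simp only [List.mem_map] at hmem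
            obtain ⟨q, hq, hq1⟩ := hmem
            have hq' := List.mem_filter.mp hq
            have heq : q = p := hinj q hq'.1 p hp (by injection hq1)
            rw [← heq]; exact hq'.2
          · exfalso
            rw [hOUT] at hhd
            cases hfle : items.filter (fun p => AV_matches mode keylist p.1 p.2) with
            | nil => rw [hfle] at hhd; simp at hhd
            | cons q ql => rw [hfle] at hhd; simp at hhd
        · intro hm
          left
          rw [hOUT]
          exact List.mem_map.mpr ⟨p, List.mem_filter.mpr ⟨hp, hm⟩, rfl⟩
      exact congrArg (fun q : List String × Int => PySem.Str.join "\n" (q.1 ++ ["** Total: " ++ PySem.Int.toStr q.2]))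
        (pv_fold_eq (fun p : String × List (String × String) =>
        [p.1,
         "Result: " ++ (PySem.Dict.mk p.2).getD "result" "Unknown Result" ++ ", Method: " ++ (PySem.Dict.mk p.2).getD "method" "Unknown Method",
         "Category: " ++ (PySem.Dict.mk p.2).getD "category" "Unknown Category" ++ ", Engine Name: " ++
           (if PySem.Str.isIn "file" mode then
              (PySem.Dict.mk p.2).getD "engine_name" "Unknown Engine Name" ++ " " ++ pvOptStr ((PySem.Dict.mk p.2).get? "engine_version") ++ "v " ++ pvOptStr ((PySem.Dict.mk p.2).get? "engine_update")
            else (PySem.Dict.mk p.2).getD "engine_name" "Unknown Engine Name") ++ "\n"])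
          (fun p : String × List (String × String) => some p.1 ∈ OUT ∨ OUT.head? = some none)
          (fun p => AV_matches mode keylist p.1 p.2) items hcond [] 0 false)

-- ===== VERDICT (by name: the statement is the Claim_ definition above) =====
set_option maxHeartbeats 1000000 in
theorem AV_handler_spec : Claim_equal_AV_handler := by
  intro results mode keylist _
  unfold Spec_AV_handler AV_handler AV_handler_alt
  exact pv_main mode keylist
    (results.foldl (fun d p => d.insert (PySem.Str.replace p.1 " " "_") p.2) PySem.Dict.empty).items
    (by simpa [PySem.Dict.keys] using pv_avlist_nodup results)
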